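-- pv_equiv track=rewrite | github.com/pentobarbitone/cohomology-bot | bot.py | betti_numbers_1d
-- ===== SOURCE A (Python) =====
-- def betti_numbers_1d(vertices, edges):
--     """
--     Very simplified Betti numbers for a 1-dimensional simplicial complex
--     (just vertices and edges). This is a toy model, not full generality.
--
--     beta0 = number of connected components
--     beta1 = number of independent 1-cycles (loops)
--
--     We use:
--       beta0 = number of connected components
--       beta1 = E - V + beta0      (Euler characteristic relation in 1D)
--     """
--
--     # Build adjacency list for graph connectivity
--     adj = {v: [] for v in vertices}
--     for (u, v) in edges:
--         adj[u].append(v)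
--         adj[v].append(u)
--
--     # Count connected components with DFS
--     visited = set()
--     def dfs(start):
--         stack = [start]
--         while stack:
--             node = stack.pop()
--             if node not in visited:
--                 visited.add(node)
--                 for nei in adj[node]:
--                     if nei not in visited:
--                         stack.append(nei)
--
--     components = 0
--     for v in vertices:
--         if v not in visited:
--             components += 1
--             dfs(v)
--
--     V = len(vertices)
--     E = len(edges)
--     beta0 = components
--     beta1 = E - V + beta0
--
--     return beta0, beta1
-- ===== SOURCE B (Python) =====
-- def betti_numbers_1d(vertices, edges):
--     # Edge-driven label merging instead of DFS: start with each vertex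
--     # labelled by itself; for each edge merge the two labels; beta0 is the
--     # number of distinct labels left. beta1 = E - V + beta0 as in A.
--     label = {v: v for v in vertices}
--     for (u, v) in edges:
--         lu, lv = label[u], label[v]
--         if lu != lv:
--             for w in label:
--                 if label[w] == lv:
--                     label[w] = lu
--     beta0 = len(set(label.values()))
--     V = len(vertices)
--     E = len(edges)
--     beta1 = E - V + beta0
--     return beta0, beta1
-- ===== Notes on version B (the rewrite author's own statement) =====
-- stated objective: alternative
-- what changed: Replaces the adjacency-list + explicit-stack DFS component count with edge-driven label merging: each vertex starts labelled by itself, every edge merges its endpoints' label classes, and beta0 is the number of distinct final labels; beta1 = E - V + beta0 as in A.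
import Mathlib
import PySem

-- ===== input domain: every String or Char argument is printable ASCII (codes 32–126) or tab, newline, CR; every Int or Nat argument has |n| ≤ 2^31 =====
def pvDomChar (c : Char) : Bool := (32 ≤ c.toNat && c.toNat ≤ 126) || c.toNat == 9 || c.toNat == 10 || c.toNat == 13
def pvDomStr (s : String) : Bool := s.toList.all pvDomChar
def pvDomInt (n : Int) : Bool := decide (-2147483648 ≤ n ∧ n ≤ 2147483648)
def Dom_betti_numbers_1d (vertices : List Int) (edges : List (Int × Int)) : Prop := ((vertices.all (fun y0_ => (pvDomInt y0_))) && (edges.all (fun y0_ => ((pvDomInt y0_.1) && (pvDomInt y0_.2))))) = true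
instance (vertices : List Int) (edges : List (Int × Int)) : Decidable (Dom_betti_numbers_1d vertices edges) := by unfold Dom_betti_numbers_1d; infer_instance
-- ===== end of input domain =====

-- B replaces A's adjacency-list DFS component count with edge-driven label merging (alternative algorithm; not faster).

-- ===== PORT A =====
-- adj = {v: [] for v in vertices}; for (u,v) in edges: adj[u].append(v); adj[v].append(u)
-- (Python raises KeyError when an edge endpoint is not a key; Pre_ excludes that, so
--  Dict.modify — which would silently insert — coincides with Python on the admitted inputs.)
def pvBuildAdj (vertices : List Int) (edges : List (Int × Int)) : PySem.Dict Int (List Int) :=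
  edges.foldl (fun d e => (d.modify e.1 [] (· ++ [e.2])).modify e.2 [] (· ++ [e.1]))
    (vertices.foldl (fun d v => d.insert v ([] : List Int)) PySem.Dict.empty)

-- strict monotonicity of filter length, used only by dfsLoop's termination proof
theorem pvFilter_length_lt {α : Type} {p q : α → Bool} {l : List α}
    (hmono : ∀ x ∈ l, q x = true → p x = true) {a : α} (ha : a ∈ l)
    (hpa : p a = true) (hqa : q a = false) :
    (l.filter q).length < (l.filter p).length := by
  obtain ⟨s, t, rfl⟩ := List.append_of_mem ha
  have hs : (s.filter q).length ≤ (s.filter p).length := by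
    rw [← List.countP_eq_length_filter, ← List.countP_eq_length_filter]
    exact List.countP_mono_left (fun x hx => hmono x (by simp [hx]))
  have ht : (t.filter q).length ≤ (t.filter p).length := by
    rw [← List.countP_eq_length_filter, ← List.countP_eq_length_filter]
    exact List.countP_mono_left (fun x hx => hmono x (by simp [hx]))
  simp [List.filter_append, hpa, hqa]
  omega

theorem pvContains_add_self (visited : PySem.Set Int) (node : Int) :
    (PySem.Set.add visited node).contains node = true :=
  (PySem.Set.contains_iff _ _).mpr ((PySem.Set.mem_add _ _ _).mpr (Or.inr rfl))

theorem pvContains_add_mono {visited : PySem.Set Int} {node x : Int}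
    (h : PySem.Set.contains visited x = true) :
    (PySem.Set.add visited node).contains x = true :=
  (PySem.Set.contains_iff _ _).mpr ((PySem.Set.mem_add _ _ _).mpr (Or.inl ((PySem.Set.contains_iff _ _).mp h)))

theorem pvContains_add_of_ne {visited : PySem.Set Int} {node x : Int} (hne : x ≠ node) :
    (PySem.Set.add visited node).contains x = PySem.Set.contains visited x := by
  by_cases hc : PySem.Set.contains visited x = true
  · rw [hc, pvContains_add_mono hc]
  · rw [Bool.not_eq_true] at hc
    rw [hc, Bool.eq_false_iff]
    intro hc'
    rcases (PySem.Set.mem_add _ _ _).mp ((PySem.Set.contains_iff _ _).mp hc') with hm | hm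
    · rw [(PySem.Set.contains_iff _ _).mpr hm] at hc; exact absurd hc (by simp)
    · exact hne hm

-- the inner 'while stack:' loop of dfs; head of the list = top of the Python stack
def dfsLoop (adj : PySem.Dict Int (List Int)) (visited : PySem.Set Int) (stack : List Int) :
    PySem.Set Int :=
  match stack with
  | [] => visited
  | node :: rest =>
    if _h : PySem.Set.contains visited node = true then dfsLoop adj visited rest
    else
      let visited' := PySem.Set.add visited node
      dfsLoop adj visited'
        (((adj.getD node []).filter (fun nei => !(PySem.Set.contains visited' nei))).reverse ++ rest)
termination_by ((adj.keys.filter (fun x => !(PySem.Set.contains visited x))).length, stack.length)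
decreasing_by
  · exact Prod.Lex.right _ (by simp)
  · have hmono : ∀ x ∈ adj.keys,
        (!(PySem.Set.contains (PySem.Set.add visited node) x)) = true →
        (!(PySem.Set.contains visited x)) = true := by
      intro x _ hx
      rw [Bool.not_eq_eq_eq_not, Bool.not_true] at hx ⊢
      rw [Bool.eq_false_iff] at hx ⊢
      intro hc; exact hx (pvContains_add_mono hc)
    by_cases hk : node ∈ adj.keys
    · apply Prod.Lex.left
      apply pvFilter_length_lt hmono hk
      · rw [Bool.not_eq_eq_eq_not, Bool.not_true, Bool.eq_false_iff]; exact _h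
      · rw [Bool.not_eq_eq_eq_not, Bool.not_false]; exact pvContains_add_self visited node
    · have hempty : adj.getD node [] = [] := by
        apply PySem.Dict.getD_of_not_contains
        rw [Bool.eq_false_iff]
        intro hc
        exact hk ((PySem.Dict.contains_iff_mem_keys _ _).mp hc)
      have hfeq : adj.keys.filter (fun x => !(PySem.Set.contains (PySem.Set.add visited node) x)) =
          adj.keys.filter (fun x => !(PySem.Set.contains visited x)) := by
        apply List.filter_congr
        intro x hx
        have hxne : x ≠ node := fun hxe => hk (hxe ▸ hx)
        rw [pvContains_add_of_ne hxne]
      rw [hempty]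
      simp only [List.filter_nil, List.reverse_nil, List.nil_append, hfeq]
      exact Prod.Lex.right _ (by simp)

-- ===== PORT B =====
-- body of B's inner loop: 'if label[w] == lv: label[w] = lu'
def pvRelabel (lv lu x : Int) : Int := if x == lv then lu else x

def pvMerge (label : PySem.Dict Int Int) (e : Int × Int) : PySem.Dict Int Int :=
  let lu := label.getD e.1 0   -- Python label[u] raises on a missing key; Pre_ guarantees presence
  let lv := label.getD e.2 0
  if lu == lv then label
  else
    -- 'for w in label: if label[w] == lv: label[w] = lu' rewrites values in place,
    -- keeping the key order: exactly a map over the items list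
    PySem.Dict.mk (label.items.map (fun p => (p.1, pvRelabel lv lu p.2)))

def betti_numbers_1d_alt (vertices : List Int) (edges : List (Int × Int)) : Int × Int :=
  let label0 := vertices.foldl (fun d v => d.insert v v) PySem.Dict.empty
  let label := edges.foldl pvMerge label0
  let beta0 : Int := (PySem.Set.ofList label.values).length
  (beta0, (edges.length : Int) - (vertices.length : Int) + beta0)

def betti_numbers_1d (vertices : List Int) (edges : List (Int × Int)) : Int × Int :=
  let adj := pvBuildAdj vertices edges
  let res := vertices.foldl
    (fun (st : Int × PySem.Set Int) v =>
      if PySem.Set.contains st.2 v = true then st else (st.1 + 1, dfsLoop adj st.2 [v]))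
    ((0 : Int), (PySem.Set.empty : PySem.Set Int))
  (res.1, (edges.length : Int) - (vertices.length : Int) + res.1)

-- ===== PRECONDITION & SPEC =====
-- Pre_ excludes exactly the inputs where the Python A raises KeyError (an edge endpoint
-- that is not a vertex); B raises KeyError there too.
def Pre_betti_numbers_1d (vertices : List Int) (edges : List (Int × Int)) : Prop :=
  ∀ e ∈ edges, e.1 ∈ vertices ∧ e.2 ∈ vertices
instance (vertices : List Int) (edges : List (Int × Int)) :
    Decidable (Pre_betti_numbers_1d vertices edges) := by
  unfold Pre_betti_numbers_1d; infer_instance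

def pvWitness_betti_numbers_1d : List Int × (List (Int × Int)) := ([0, 1, 2], [(0, 1)])

def Spec_betti_numbers_1d (vertices : List Int) (edges : List (Int × Int)) (out : Int × Int) :
    Prop := out = betti_numbers_1d_alt vertices edges
instance (vertices : List Int) (edges : List (Int × Int)) (out : Int × Int) :
    Decidable (Spec_betti_numbers_1d vertices edges out) := by
  unfold Spec_betti_numbers_1d; infer_instance

-- ===== CLAIM (what is proved, stated in full; the proofs are below) =====
def Claim_equal_betti_numbers_1d : Prop :=
  ∀ (vertices : List Int) (edges : List (Int × Int)), Dom_betti_numbers_1d vertices edges →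
    Pre_betti_numbers_1d vertices edges →
    Spec_betti_numbers_1d vertices edges (betti_numbers_1d vertices edges)

-- ===== LEMMAS AND PROOFS =====

-- one edge step, in either direction
def pvAdjRel (edges : List (Int × Int)) (a b : Int) : Prop := (a, b) ∈ edges ∨ (b, a) ∈ edges

-- connectivity in the graph spanned by the edges
def pvConn (edges : List (Int × Int)) : Int → Int → Prop :=
  Relation.ReflTransGen (pvAdjRel edges)

-- number of connected components met along a list, given classes already seen
noncomputable def pvRepCount (es : List (Int × Int)) (seen : List Int) : List Int → Nat
  | [] => 0
  | v :: rest =>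
    (@ite _ (∃ w ∈ seen, pvConn es w v) (Classical.propDecidable _) 0 1) +
      pvRepCount es (seen ++ [v]) rest

theorem pvConn_refl (es : List (Int × Int)) (a : Int) : pvConn es a a :=
  Relation.ReflTransGen.refl

theorem pvConn_trans {es : List (Int × Int)} {a b c : Int}
    (h1 : pvConn es a b) (h2 : pvConn es b c) : pvConn es a c :=
  Relation.ReflTransGen.trans h1 h2

theorem pvConn_symm {es : List (Int × Int)} {a b : Int} (h : pvConn es a b) : pvConn es b a := by
  induction h with
  | refl => exact pvConn_refl es a
  | tail _ step ih => exact Relation.ReflTransGen.head (Or.elim step Or.inr Or.inl) ih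

theorem pvConn_nil {a b : Int} : pvConn [] a b ↔ a = b := by
  constructor
  · intro h
    induction h with
    | refl => rfl
    | tail _ step _ => rcases step with h | h <;> simp at h
  · rintro rfl; exact pvConn_refl [] a

theorem pvConn_mono {es : List (Int × Int)} (e : Int × Int) {a b : Int} (h : pvConn es a b) :
    pvConn (es ++ [e]) a b := by
  refine Relation.ReflTransGen.mono ?_ h
  intro x y hxy
  rcases hxy with h | h
  · exact Or.inl (by simp [h])
  · exact Or.inr (by simp [h])

theorem pvConn_append_singleton {es : List (Int × Int)} {u v a b : Int} :
    pvConn (es ++ [(u, v)]) a b ↔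
      pvConn es a b ∨ (pvConn es a u ∧ pvConn es v b) ∨ (pvConn es a v ∧ pvConn es u b) := by
  constructor
  · intro h
    induction h with
    | refl => exact Or.inl (pvConn_refl es a)
    | @tail m n hm step ih =>
      have hstep : pvAdjRel es m n ∨ (m = u ∧ n = v) ∨ (m = v ∧ n = u) := by
        rcases step with hm | hm <;> simp only [List.mem_append, List.mem_singleton] at hm
        · rcases hm with hm | hm
          · exact Or.inl (Or.inl hm)
          · exact Or.inr (Or.inl ⟨congrArg Prod.fst hm, congrArg Prod.snd hm⟩)
        · rcases hm with hm | hm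
          · exact Or.inl (Or.inr hm)
          · exact Or.inr (Or.inr ⟨congrArg Prod.snd hm, congrArg Prod.fst hm⟩)
      rcases hstep with hs | ⟨hcu, hbv⟩ | ⟨hcv, hbu⟩
      · rcases ih with h1 | ⟨h1, h2⟩ | ⟨h1, h2⟩
        · exact Or.inl (h1.tail hs)
        · exact Or.inr (Or.inl ⟨h1, h2.tail hs⟩)
        · exact Or.inr (Or.inr ⟨h1, h2.tail hs⟩)
      · subst hcu; subst hbv
        rcases ih with h1 | ⟨h1, h2⟩ | ⟨h1, h2⟩
        · exact Or.inr (Or.inl ⟨h1, pvConn_refl es n⟩)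
        · exact Or.inr (Or.inl ⟨h1, pvConn_refl es n⟩)
        · exact Or.inl h1
      · subst hcv; subst hbu
        rcases ih with h1 | ⟨h1, h2⟩ | ⟨h1, h2⟩
        · exact Or.inr (Or.inr ⟨h1, pvConn_refl es n⟩)
        · exact Or.inl h1
        · exact Or.inr (Or.inr ⟨h1, pvConn_refl es n⟩)
  · have hnew : pvConn (es ++ [(u, v)]) u v :=
      Relation.ReflTransGen.single (Or.inl (by simp))
    rintro (h | ⟨h1, h2⟩ | ⟨h1, h2⟩)
    · exact pvConn_mono _ h
    · exact pvConn_trans (pvConn_mono _ h1) (pvConn_trans hnew (pvConn_mono _ h2))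
    · exact pvConn_trans (pvConn_mono _ h1)
        (pvConn_trans (pvConn_symm hnew) (pvConn_mono _ h2))

theorem pvConn_append_congr {es : List (Int × Int)} {u v a b : Int} (huv : pvConn es u v) :
    pvConn (es ++ [(u, v)]) a b ↔ pvConn es a b := by
  rw [pvConn_append_singleton]
  constructor
  · rintro (h | ⟨h1, h2⟩ | ⟨h1, h2⟩)
    · exact h
    · exact pvConn_trans h1 (pvConn_trans huv h2)
    · exact pvConn_trans h1 (pvConn_trans (pvConn_symm huv) h2)
  · exact Or.inl

-- adjacency-list membership is exactly the symmetric edge relation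
theorem pvMem_adj (vertices : List Int) (edges : List (Int × Int)) (x y : Int) :
    y ∈ (pvBuildAdj vertices edges).getD x [] ↔ pvAdjRel edges x y := by
  have hbase : ∀ (vs : List Int) (d : PySem.Dict Int (List Int)),
      (∀ z, d.getD z [] = []) → ∀ z, (vs.foldl (fun d v => d.insert v ([] : List Int)) d).getD z [] = [] := by
    intro vs
    induction vs with
    | nil => intro d hd z; exact hd z
    | cons v vs ih =>
      intro d hd z
      refine ih _ ?_ z
      intro w
      rw [PySem.Dict.getD_insert]
      split <;> simp [hd]
  have hdouble : ∀ (es : List (Int × Int)) (d : PySem.Dict Int (List Int)),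
      es.foldl (fun d e => (d.modify e.1 [] (· ++ [e.2])).modify e.2 [] (· ++ [e.1])) d =
        (es.flatMap (fun e => [(e.1, e.2), (e.2, e.1)])).foldl
          (fun d p => d.modify p.1 [] (· ++ [p.2])) d := by
    intro es d
    rw [List.foldl_flatMap]
    rfl
  unfold pvBuildAdj
  rw [hdouble, PySem.Dict.getD_foldl_modify_append,
    hbase vertices PySem.Dict.empty (fun z => PySem.Dict.getD_empty ..)]
  unfold pvAdjRel
  simp only [List.nil_append, List.mem_map, List.mem_filter, List.mem_flatMap,
    List.mem_cons, beq_iff_eq, List.not_mem_nil, or_false]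
  constructor
  · rintro ⟨p, ⟨⟨e, he, (rfl | rfl)⟩, hx⟩, rfl⟩
    · exact Or.inl (by simpa [← hx] using he)
    · exact Or.inr (by simpa [← hx] using he)
  · rintro (he | he)
    · exact ⟨(x, y), ⟨⟨(x, y), he, Or.inl rfl⟩, rfl⟩, rfl⟩
    · exact ⟨(x, y), ⟨⟨(y, x), he, Or.inr rfl⟩, rfl⟩, rfl⟩

theorem pvDfs_mono (adj : PySem.Dict Int (List Int)) (visited : PySem.Set Int) (stack : List Int) :
    ∀ x ∈ visited, x ∈ dfsLoop adj visited stack := by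
  fun_induction dfsLoop with
  | case1 => intro x hx; exact hx
  | case2 visited node rest h ih => exact ih
  | case3 visited node rest h visited' ih =>
    intro x hx
    exact ih x ((PySem.Set.mem_add _ _ _).mpr (Or.inl hx))

theorem pvDfs_stack_mem (adj : PySem.Dict Int (List Int)) (visited : PySem.Set Int)
    (stack : List Int) : ∀ s ∈ stack, s ∈ dfsLoop adj visited stack := by
  fun_induction dfsLoop with
  | case1 => intro s hs; exact absurd hs (List.not_mem_nil)
  | case2 visited node rest h ih =>
    intro s hs
    rcases List.mem_cons.mp hs with rfl | hs
    · exact pvDfs_mono adj visited rest s ((PySem.Set.contains_iff _ _).mp h)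
    · exact ih s hs
  | case3 visited node rest h visited' ih =>
    intro s hs
    rcases List.mem_cons.mp hs with rfl | hs
    · exact pvDfs_mono adj visited' _ s ((PySem.Set.mem_add _ _ _).mpr (Or.inr rfl))
    · exact ih s (List.mem_append.mpr (Or.inr hs))

theorem pvDfs_upper {es : List (Int × Int)} (adj : PySem.Dict Int (List Int))
    (hadj : ∀ x y, y ∈ adj.getD x [] ↔ pvAdjRel es x y)
    (visited : PySem.Set Int) (stack : List Int) :
    ∀ x ∈ dfsLoop adj visited stack, x ∈ visited ∨ ∃ s ∈ stack, pvConn es s x := by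
  fun_induction dfsLoop with
  | case1 => intro x hx; exact Or.inl hx
  | case2 visited node rest h ih =>
    intro x hx
    rcases ih x hx with hv | ⟨s, hs, hc⟩
    · exact Or.inl hv
    · exact Or.inr ⟨s, List.mem_cons_of_mem _ hs, hc⟩
  | case3 visited node rest h visited' ih =>
    intro x hx
    rcases ih x hx with hv | ⟨s, hs, hc⟩
    · rcases (PySem.Set.mem_add _ _ _).mp hv with hv | rfl
      · exact Or.inl hv
      · exact Or.inr ⟨x, List.mem_cons_self, pvConn_refl es x⟩
    · rcases List.mem_append.mp hs with hpush | hrest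
      · have hnbr : s ∈ adj.getD node [] :=
          List.mem_of_mem_filter (List.mem_reverse.mp hpush)
        exact Or.inr ⟨node, List.mem_cons_self,
          pvConn_trans (Relation.ReflTransGen.single ((hadj node s).mp hnbr)) hc⟩
      · exact Or.inr ⟨s, List.mem_cons_of_mem _ hrest, hc⟩

theorem pvDfs_closed {es : List (Int × Int)} (adj : PySem.Dict Int (List Int))
    (hadj : ∀ x y, y ∈ adj.getD x [] ↔ pvAdjRel es x y)
    (visited : PySem.Set Int) (stack : List Int) :
    (∀ x ∈ visited, ∀ y, pvAdjRel es x y → y ∈ visited ∨ y ∈ stack) →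
    ∀ x ∈ dfsLoop adj visited stack, ∀ y, pvAdjRel es x y → y ∈ dfsLoop adj visited stack := by
  induction visited, stack using dfsLoop.induct adj with
  | case1 visited =>
    intro Hinv x hx y hy
    rw [dfsLoop] at hx ⊢
    rcases Hinv x hx y hy with hv | hv
    · exact hv
    · exact absurd hv (List.not_mem_nil)
  | case2 visited node rest h ih =>
    intro Hinv
    rw [dfsLoop, dif_pos h]
    apply ih
    intro x hx y hy
    rcases Hinv x hx y hy with hv | hv
    · exact Or.inl hv
    · rcases List.mem_cons.mp hv with rfl | hv
      · exact Or.inl ((PySem.Set.contains_iff _ _).mp h)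
      · exact Or.inr hv
  | case3 visited node rest h visited' ih =>
    intro Hinv
    rw [dfsLoop, dif_neg h]
    apply ih
    intro x hx y hy
    rcases (PySem.Set.mem_add _ _ _).mp hx with hx | rfl
    · rcases Hinv x hx y hy with hv | hv
      · exact Or.inl ((PySem.Set.mem_add _ _ _).mpr (Or.inl hv))
      · rcases List.mem_cons.mp hv with rfl | hv
        · exact Or.inl ((PySem.Set.mem_add _ _ _).mpr (Or.inr rfl))
        · exact Or.inr (List.mem_append.mpr (Or.inr hv))
    · have hnbr : y ∈ adj.getD x [] := (hadj x y).mpr hy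
      by_cases hyv : y ∈ PySem.Set.add visited x
      · exact Or.inl hyv
      · refine Or.inr (List.mem_append.mpr (Or.inl (List.mem_reverse.mpr ?_)))
        refine List.mem_filter.mpr ⟨hnbr, ?_⟩
        simp only [Bool.not_eq_eq_eq_not, Bool.not_true, Bool.eq_false_iff]
        intro hc
        exact hyv ((PySem.Set.contains_iff _ _).mp hc)
theorem pvDfs_run {es : List (Int × Int)} (adj : PySem.Dict Int (List Int))
    (hadj : ∀ x y, y ∈ adj.getD x [] ↔ pvAdjRel es x y)
    (visited : PySem.Set Int)
    (hclosed : ∀ x ∈ visited, ∀ y, pvAdjRel es x y → y ∈ visited) (v : Int) :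
    ∀ x, x ∈ dfsLoop adj visited [v] ↔ x ∈ visited ∨ pvConn es v x := by
  have Hinv : ∀ x ∈ visited, ∀ y, pvAdjRel es x y → y ∈ visited ∨ y ∈ [v] :=
    fun x hx y hy => Or.inl (hclosed x hx y hy)
  intro x
  constructor
  · intro hx
    rcases pvDfs_upper adj hadj visited [v] x hx with hv | ⟨s, hs, hc⟩
    · exact Or.inl hv
    · rcases List.mem_singleton.mp hs with rfl
      exact Or.inr hc
  · rintro (hv | hc)
    · exact pvDfs_mono adj visited [v] x hv
    · induction hc with
      | refl => exact pvDfs_stack_mem adj visited [v] v (List.mem_singleton_self _)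
      | tail _ step ih => exact pvDfs_closed adj hadj visited [v] Hinv _ ih _ step

theorem pvOuter {es : List (Int × Int)} (adj : PySem.Dict Int (List Int))
    (hadj : ∀ x y, y ∈ adj.getD x [] ↔ pvAdjRel es x y) :
    ∀ (rest : List Int) (c : Int) (vis : PySem.Set Int) (seen : List Int),
    (∀ x, x ∈ vis ↔ ∃ w ∈ seen, pvConn es w x) →
    (rest.foldl (fun (st : Int × PySem.Set Int) v =>
        if PySem.Set.contains st.2 v = true then st else (st.1 + 1, dfsLoop adj st.2 [v]))
      (c, vis)).1 = c + pvRepCount es seen rest := by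
  intro rest
  induction rest with
  | nil => intro c vis seen _; simp [pvRepCount]
  | cons v rest ih =>
    intro c vis seen hvis
    have hclosed : ∀ x ∈ vis, ∀ y, pvAdjRel es x y → y ∈ vis := by
      intro x hx y hy
      obtain ⟨w, hw, hc⟩ := (hvis x).mp hx
      exact (hvis y).mpr ⟨w, hw, pvConn_trans hc (Relation.ReflTransGen.single hy)⟩
    simp only [List.foldl_cons, pvRepCount]
    by_cases hv : v ∈ vis
    · rw [if_pos ((PySem.Set.contains_iff _ _).mpr hv)]
      obtain ⟨w, hw, hcwv⟩ := (hvis v).mp hv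
      rw [if_pos ⟨w, hw, hcwv⟩]
      have hvis' : ∀ x, x ∈ vis ↔ ∃ w ∈ seen ++ [v], pvConn es w x := by
        intro x
        rw [hvis x]
        constructor
        · rintro ⟨w', hw', hc⟩; exact ⟨w', List.mem_append.mpr (Or.inl hw'), hc⟩
        · rintro ⟨w', hw', hc⟩
          rcases List.mem_append.mp hw' with hw' | hw'
          · exact ⟨w', hw', hc⟩
          · rcases List.mem_singleton.mp hw' with rfl
            exact ⟨w, hw, pvConn_trans hcwv hc⟩
      rw [ih c vis (seen ++ [v]) hvis']
      push_cast; ring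
    · rw [if_neg (fun hc => hv ((PySem.Set.contains_iff _ _).mp hc))]
      have hnot : ¬ ∃ w ∈ seen, pvConn es w v :=
        fun ⟨w, hw, hc⟩ => hv ((hvis v).mpr ⟨w, hw, hc⟩)
      rw [if_neg hnot]
      have hvis' : ∀ x, x ∈ dfsLoop adj vis [v] ↔ ∃ w ∈ seen ++ [v], pvConn es w x := by
        intro x
        rw [pvDfs_run adj hadj vis hclosed v x]
        constructor
        · rintro (hx | hc)
          · obtain ⟨w', hw', hc⟩ := (hvis x).mp hx
            exact ⟨w', List.mem_append.mpr (Or.inl hw'), hc⟩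
          · exact ⟨v, List.mem_append.mpr (Or.inr (List.mem_singleton_self _)), hc⟩
        · rintro ⟨w', hw', hc⟩
          rcases List.mem_append.mp hw' with hw' | hw'
          · exact Or.inl ((hvis x).mpr ⟨w', hw', hc⟩)
          · rcases List.mem_singleton.mp hw' with rfl
            exact Or.inr hc
      rw [ih (c + 1) (dfsLoop adj vis [v]) (seen ++ [v]) hvis']
      push_cast; ring

-- A's component count is the number of pvConn-classes met along the vertex list
theorem pvA_count (vertices : List Int) (edges : List (Int × Int)) :
    (betti_numbers_1d vertices edges).1 = (pvRepCount edges [] vertices : Int) := by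
  unfold betti_numbers_1d
  have h := pvOuter (pvBuildAdj vertices edges) (pvMem_adj vertices edges) vertices 0
    PySem.Set.empty []
    (by intro x; constructor
        · intro hx; exact absurd hx (List.not_mem_nil)
        · rintro ⟨w, hw, -⟩; exact absurd hw (List.not_mem_nil))
  simpa using h
theorem pvLabel0_keys (vertices : List Int) :
    (vertices.foldl (fun d v => d.insert v v) PySem.Dict.empty).keys =
      PySem.Set.ofList vertices := by
  rw [PySem.Dict.keys_foldl_insert]
  simp [PySem.Dict.keys_empty, PySem.Set.update_nil_left]

theorem pvLabel0_getD (vertices : List Int) (w : Int) (hw : w ∈ vertices) :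
    (vertices.foldl (fun d v => d.insert v v) PySem.Dict.empty).getD w 0 = w := by
  induction vertices using List.reverseRecOn with
  | nil => exact absurd hw (List.not_mem_nil)
  | append_singleton l x ih =>
    rw [List.foldl_append, List.foldl_cons, List.foldl_nil, PySem.Dict.getD_insert]
    rcases List.mem_append.mp hw with hw | hw
    · by_cases hwx : w = x
      · rw [if_pos hwx, hwx]
      · rw [if_neg hwx]; exact ih hw
    · rcases List.mem_singleton.mp hw with rfl
      rw [if_pos rfl]

theorem pvKeys_mapValues (d : PySem.Dict Int Int) (f : Int → Int) :
    (PySem.Dict.mk (d.items.map (fun p => (p.1, f p.2)))).keys = d.keys := by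
  simp [PySem.Dict.keys, List.map_map, Function.comp]

theorem pvGetD_mapValues (d : PySem.Dict Int Int) (hn : d.keys.Nodup) (f : Int → Int)
    (w : Int) (hw : w ∈ d.keys) :
    (PySem.Dict.mk (d.items.map (fun p => (p.1, f p.2)))).getD w 0 = f (d.getD w 0) := by
  obtain ⟨p, hp, hp1⟩ := List.mem_map.mp hw
  have hpw : (w, p.2) ∈ d.items := by rw [← hp1]; exact hp
  have hgd : d.getD w 0 = p.2 := PySem.Dict.getD_of_mem_items d hpw hn 0
  have hnew : (w, f p.2) ∈ (PySem.Dict.mk (d.items.map (fun p => (p.1, f p.2)))).items :=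
    List.mem_map.mpr ⟨p, hp, by rw [hp1]⟩
  have hn' : (PySem.Dict.mk (d.items.map (fun p => (p.1, f p.2)))).keys.Nodup := by
    rw [pvKeys_mapValues]; exact hn
  rw [PySem.Dict.getD_of_mem_items _ hnew hn' 0, hgd]

-- loop invariant of B: keys are the distinct vertices, and two vertices carry the same
-- label exactly when the edges processed so far connect them
def pvGood (es : List (Int × Int)) (vertices : List Int) (d : PySem.Dict Int Int) : Prop :=
  d.keys = PySem.Set.ofList vertices ∧
  ∀ w ∈ vertices, ∀ w' ∈ vertices, (d.getD w 0 = d.getD w' 0 ↔ pvConn es w w')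

theorem pvGood_init (vertices : List Int) :
    pvGood [] vertices (vertices.foldl (fun d v => d.insert v v) PySem.Dict.empty) := by
  refine ⟨pvLabel0_keys vertices, ?_⟩
  intro w hw w' hw'
  rw [pvLabel0_getD vertices w hw, pvLabel0_getD vertices w' hw', pvConn_nil]

theorem pvGood_step {es : List (Int × Int)} {vertices : List Int} {d : PySem.Dict Int Int}
    (e : Int × Int) (he1 : e.1 ∈ vertices) (he2 : e.2 ∈ vertices)
    (hg : pvGood es vertices d) : pvGood (es ++ [e]) vertices (pvMerge d e) := by
  obtain ⟨hk, hcore⟩ := hg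
  have hn : d.keys.Nodup := by rw [hk]; exact PySem.Set.nodup_ofList vertices
  have hmemk : ∀ w ∈ vertices, w ∈ d.keys := by
    intro w hw; rw [hk]; exact (PySem.Set.mem_ofList _ _).mpr hw
  unfold pvMerge
  by_cases heq : d.getD e.1 0 = d.getD e.2 0
  · rw [if_pos (beq_iff_eq.mpr heq)]
    have huv : pvConn es e.1 e.2 := (hcore e.1 he1 e.2 he2).mp heq
    refine ⟨hk, ?_⟩
    intro w hw w' hw'
    have : (e.1, e.2) = e := rfl
    rw [hcore w hw w' hw', ← this, pvConn_append_congr huv]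
  · rw [if_neg (by simpa [beq_iff_eq] using heq)]
    set lu := d.getD e.1 0 with hlu
    set lv := d.getD e.2 0 with hlv
    constructor
    · rw [pvKeys_mapValues d (pvRelabel lv lu)]; exact hk
    · intro w hw w' hw'
      rw [pvGetD_mapValues d hn (pvRelabel lv lu) w (hmemk w hw),
        pvGetD_mapValues d hn (pvRelabel lv lu) w' (hmemk w' hw')]
      unfold pvRelabel
      have hcw_u : d.getD w 0 = lu ↔ pvConn es w e.1 := hcore w hw e.1 he1
      have hcw_v : d.getD w 0 = lv ↔ pvConn es w e.2 := hcore w hw e.2 he2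
      have hcw'_u : d.getD w' 0 = lu ↔ pvConn es w' e.1 := hcore w' hw' e.1 he1
      have hcw'_v : d.getD w' 0 = lv ↔ pvConn es w' e.2 := hcore w' hw' e.2 he2
      have hww' : d.getD w 0 = d.getD w' 0 ↔ pvConn es w w' := hcore w hw w' hw'
      have he : (e.1, e.2) = e := rfl
      have hvw' : pvConn es e.2 w' ↔ d.getD w' 0 = lv :=
        ⟨fun h => hcw'_v.mpr (pvConn_symm h), fun h => pvConn_symm (hcw'_v.mp h)⟩
      have huw' : pvConn es e.1 w' ↔ d.getD w' 0 = lu :=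
        ⟨fun h => hcw'_u.mpr (pvConn_symm h), fun h => pvConn_symm (hcw'_u.mp h)⟩
      rw [← he, pvConn_append_singleton, ← hww', ← hcw_u, ← hcw_v, hvw', huw']
      by_cases ha : d.getD w 0 = lv <;> by_cases hb : d.getD w' 0 = lv
      · rw [if_pos (beq_iff_eq.mpr ha), if_pos (beq_iff_eq.mpr hb)]
        constructor
        · intro _; exact Or.inl (ha.trans hb.symm)
        · intro _; rfl
      · rw [if_pos (beq_iff_eq.mpr ha), if_neg (by simpa [beq_iff_eq] using hb)]
        constructor
        · intro h1; exact Or.inr (Or.inr ⟨ha, h1.symm⟩)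
        · rintro (h1 | ⟨h1, h2⟩ | ⟨h1, h2⟩)
          · exact absurd (ha ▸ h1) (fun hc => hb hc.symm)
          · exact absurd h2 hb
          · exact h2.symm
      · rw [if_neg (by simpa [beq_iff_eq] using ha), if_pos (beq_iff_eq.mpr hb)]
        constructor
        · intro h1; exact Or.inr (Or.inl ⟨h1, hb⟩)
        · rintro (h1 | ⟨h1, h2⟩ | ⟨h1, h2⟩)
          · exact absurd (h1.trans hb) ha
          · exact h1
          · exact absurd h1 ha
      · rw [if_neg (by simpa [beq_iff_eq] using ha), if_neg (by simpa [beq_iff_eq] using hb)]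
        constructor
        · intro h1; exact Or.inl h1
        · rintro (h1 | ⟨h1, h2⟩ | ⟨h1, h2⟩)
          · exact h1
          · exact absurd h2 hb
          · exact absurd h1 ha
theorem pvGood_final (vertices : List Int) :
    ∀ (es : List (Int × Int)), (∀ e ∈ es, e.1 ∈ vertices ∧ e.2 ∈ vertices) →
    pvGood es vertices (es.foldl pvMerge (vertices.foldl (fun d v => d.insert v v) PySem.Dict.empty)) := by
  intro es
  induction es using List.reverseRecOn with
  | nil => intro _; exact pvGood_init vertices
  | append_singleton F e ih =>
    intro hpre
    rw [List.foldl_append, List.foldl_cons, List.foldl_nil]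
    have he := hpre e (List.mem_append.mpr (Or.inr (List.mem_singleton_self _)))
    exact pvGood_step e he.1 he.2
      (ih (fun e' he' => hpre e' (List.mem_append.mpr (Or.inl he'))))

-- deduplicating before mapping does not change the set of mapped values (or its order)
theorem pvOfList_map_ofList (l : List Int) (f : Int → Int) :
    PySem.Set.ofList ((PySem.Set.ofList l).map f) = PySem.Set.ofList (l.map f) := by
  induction l using List.reverseRecOn with
  | nil => rfl
  | append_singleton l x ih =>
    rw [List.map_append, List.map_singleton, PySem.Set.ofList_append_singleton,
      PySem.Set.ofList_append_singleton]
    by_cases hx : x ∈ PySem.Set.ofList l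
    · rw [PySem.Set.add_of_mem hx, ih]
      have hfx : f x ∈ PySem.Set.ofList (l.map f) := by
        rw [PySem.Set.mem_ofList]
        exact List.mem_map.mpr ⟨x, (PySem.Set.mem_ofList _ _).mp hx, rfl⟩
      rw [PySem.Set.add_of_mem hfx]
    · rw [PySem.Set.add_of_not_mem hx, List.map_append, List.map_singleton,
        PySem.Set.ofList_append_singleton, ih]

-- counting distinct labels along a list counts the pvConn-classes met
theorem pvCount {es : List (Int × Int)} {vertices : List Int} {f : Int → Int}
    (hf : ∀ w ∈ vertices, ∀ w' ∈ vertices, (f w = f w' ↔ pvConn es w w')) :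
    ∀ (K seen : List Int) (S : PySem.Set Int),
    (∀ x ∈ K, x ∈ vertices) → (∀ w ∈ seen, w ∈ vertices) →
    (∀ x ∈ vertices, (f x ∈ S ↔ ∃ w ∈ seen, pvConn es w x)) →
    (PySem.Set.update S (K.map f)).length = S.length + pvRepCount es seen K := by
  intro K
  induction K with
  | nil => intro seen S _ _ _; simp [pvRepCount, PySem.Set.update]
  | cons x K ih =>
    intro seen S hK hseen hS
    have hxv : x ∈ vertices := hK x List.mem_cons_self
    rw [List.map_cons, PySem.Set.update_cons]
    simp only [pvRepCount]
    by_cases hc : ∃ w ∈ seen, pvConn es w x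
    · rw [if_pos hc]
      have hfx : f x ∈ S := (hS x hxv).mpr hc
      rw [PySem.Set.add_of_mem hfx]
      rw [ih (seen ++ [x]) S (fun y hy => hK y (List.mem_cons_of_mem _ hy)) ?_ ?_]
      · omega
      · intro w hw
        rcases List.mem_append.mp hw with hw | hw
        · exact hseen w hw
        · rcases List.mem_singleton.mp hw with rfl; exact hxv
      · intro y hy
        rw [hS y hy]
        obtain ⟨w0, hw0, hw0c⟩ := hc
        constructor
        · rintro ⟨w, hw, hcw⟩; exact ⟨w, List.mem_append.mpr (Or.inl hw), hcw⟩
        · rintro ⟨w, hw, hcw⟩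
          rcases List.mem_append.mp hw with hw | hw
          · exact ⟨w, hw, hcw⟩
          · rcases List.mem_singleton.mp hw with rfl
            exact ⟨w0, hw0, pvConn_trans hw0c hcw⟩
    · rw [if_neg hc]
      have hfx : f x ∉ S := fun hmem => hc ((hS x hxv).mp hmem)
      rw [PySem.Set.add_of_not_mem hfx]
      rw [ih (seen ++ [x]) (S ++ [f x]) (fun y hy => hK y (List.mem_cons_of_mem _ hy)) ?_ ?_]
      · rw [List.length_append, List.length_singleton]; omega
      · intro w hw
        rcases List.mem_append.mp hw with hw | hw
        · exact hseen w hw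
        · rcases List.mem_singleton.mp hw with rfl; exact hxv
      · intro y hy
        constructor
        · intro hmem
          rcases List.mem_append.mp hmem with hmem | hmem
          · obtain ⟨w, hw, hcw⟩ := (hS y hy).mp hmem
            exact ⟨w, List.mem_append.mpr (Or.inl hw), hcw⟩
          · rcases List.mem_singleton.mp hmem with hfy
            exact ⟨x, List.mem_append.mpr (Or.inr (List.mem_singleton_self _)),
              (hf x hxv y hy).mp hfy.symm⟩
        · rintro ⟨w, hw, hcw⟩
          rcases List.mem_append.mp hw with hw | hw
          · exact List.mem_append.mpr (Or.inl ((hS y hy).mpr ⟨w, hw, hcw⟩))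
          · rcases List.mem_singleton.mp hw with rfl
            exact List.mem_append.mpr
              (Or.inr (List.mem_singleton.mpr ((hf w hxv y hy).mpr hcw).symm))

-- B's distinct-label count is the same class count
theorem pvB_count (vertices : List Int) (edges : List (Int × Int))
    (hpre : ∀ e ∈ edges, e.1 ∈ vertices ∧ e.2 ∈ vertices) :
    (betti_numbers_1d_alt vertices edges).1 = (pvRepCount edges [] vertices : Int) := by
  obtain ⟨hk, hcore⟩ := pvGood_final vertices edges hpre
  set label := edges.foldl pvMerge (vertices.foldl (fun d v => d.insert v v) PySem.Dict.empty)
    with hlabel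
  have hform : (betti_numbers_1d_alt vertices edges).1 =
      ((PySem.Set.ofList label.values).length : Int) := rfl
  have hn : label.keys.Nodup := by rw [hk]; exact PySem.Set.nodup_ofList vertices
  have hvals : label.values = label.keys.map (fun k => label.getD k 0) :=
    PySem.Dict.values_eq_map_keys label hn 0
  have hcnt := pvCount (f := fun k => label.getD k 0) hcore vertices [] PySem.Set.empty
    (fun x hx => hx) (fun w hw => absurd hw (List.not_mem_nil))
    (by intro x _; constructor
        · intro hx; exact absurd hx (List.not_mem_nil)
        · rintro ⟨w, hw, -⟩; exact absurd hw (List.not_mem_nil))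
  have hempty : (PySem.Set.empty : PySem.Set Int) = [] := rfl
  rw [hempty, PySem.Set.update_nil_left] at hcnt
  simp only [List.length_nil, Nat.zero_add] at hcnt
  rw [hform, hvals, hk, pvOfList_map_ofList, hcnt]

-- ===== VERDICT (by name: the statement is the Claim_ definition above) =====
theorem betti_numbers_1d_spec : Claim_equal_betti_numbers_1d := by
  intro vertices edges _ hpre
  unfold Spec_betti_numbers_1d
  have hA : betti_numbers_1d vertices edges =
      ((betti_numbers_1d vertices edges).1,
        (edges.length : Int) - (vertices.length : Int) + (betti_numbers_1d vertices edges).1) := rfl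
  have hB : betti_numbers_1d_alt vertices edges =
      ((betti_numbers_1d_alt vertices edges).1,
        (edges.length : Int) - (vertices.length : Int) + (betti_numbers_1d_alt vertices edges).1) := rfl
  rw [hA, hB, pvA_count vertices edges, pvB_count vertices edges hpre]
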